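-- pv_equiv track=rewrite | github.com/jqyang3108/Two-Way-Authenticator-Camera | demo/decode.py | extract_end_points
-- ===== SOURCE A (Python) =====
-- def extract_end_points(firstRow):
--     wastedSpace = 0
--     for num in firstRow:
--         if num == 255:
--             wastedSpace += 1
--         else:
--             break
--     lastBlackIndex, count = wastedSpace, wastedSpace
--     for num in firstRow[wastedSpace:]:
--         if num == 0:
--             lastBlackIndex = count
--         count += 1
--     return (wastedSpace, lastBlackIndex)
-- ===== SOURCE B (Python) =====
-- def extract_end_points(firstRow):
--     wastedSpace = next((i for i, num in enumerate(firstRow) if num != 255), len(firstRow))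
--     for i in range(len(firstRow) - 1, wastedSpace - 1, -1):
--         if firstRow[i] == 0:
--             return (wastedSpace, i)
--     return (wastedSpace, wastedSpace)
-- ===== Notes on version B (the rewrite author's own statement) =====
-- stated objective: alternative
-- what changed: B finds wastedSpace as the first non-255 index and then scans backwards from the end with early exit at the first black pixel, instead of A's forward pass that overwrites a running last-black index over the whole tail.
import Mathlib
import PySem

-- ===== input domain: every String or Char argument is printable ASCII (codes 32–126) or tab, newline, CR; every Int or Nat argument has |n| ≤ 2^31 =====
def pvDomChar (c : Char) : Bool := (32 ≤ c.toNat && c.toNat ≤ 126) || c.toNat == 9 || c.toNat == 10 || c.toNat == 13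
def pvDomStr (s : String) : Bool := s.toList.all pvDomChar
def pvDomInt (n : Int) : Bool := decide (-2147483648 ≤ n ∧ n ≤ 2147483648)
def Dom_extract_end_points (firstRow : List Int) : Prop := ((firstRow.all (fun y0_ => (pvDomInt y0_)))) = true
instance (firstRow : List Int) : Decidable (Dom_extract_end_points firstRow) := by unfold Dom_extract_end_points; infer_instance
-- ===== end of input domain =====

-- B replaces A's forward tail pass (which overwrites a running last-black index) by a
-- backward scan from the end that returns at the first black pixel; same results, similar cost.

-- ===== PORT A =====
-- first loop of A: count leading 255s, breaking at the first other value
def pvWasteA (acc : Int) : List Int → Int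
  | [] => acc
  | num :: rest => if num = 255 then pvWasteA (acc + 1) rest else acc

-- second loop of A: state (lastBlackIndex, count) over firstRow[wastedSpace:]
def pvScanA (p : Int × Int) : List Int → Int × Int
  | [] => p
  | num :: rest => pvScanA ((if num = 0 then p.2 else p.1), p.2 + 1) rest

def extract_end_points (firstRow : List Int) : Int × Int :=
  let wastedSpace := pvWasteA 0 firstRow
  let r := pvScanA (wastedSpace, wastedSpace) (PySem.List.slice firstRow (some wastedSpace) none)
  (wastedSpace, r.1)

-- ===== PORT B =====
-- next((i for i, num in enumerate(firstRow) if num != 255), len(firstRow))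
def pvFirstB (firstRow : List Int) : Int :=
  match firstRow.findIdx? (fun num => num != 255) with
  | some i => (i : Int)
  | none => (firstRow.length : Int)

-- backward loop of B over range(len-1, wastedSpace-1, -1) with early return
def pvScanB (firstRow : List Int) (w : Int) : List Int → Int × Int
  | [] => (w, w)
  | i :: rest =>
      match PySem.List.pyGet? firstRow i with
      | some v => if v = 0 then (w, i) else pvScanB firstRow w rest
      | none => pvScanB firstRow w rest   -- unreachable: every generated index is in range

def extract_end_points_alt (firstRow : List Int) : Int × Int :=
  let wastedSpace := pvFirstB firstRow
  pvScanB firstRow wastedSpace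
    (PySem.List.pyRange ((firstRow.length : Int) - 1) (wastedSpace - 1) (-1))

-- ===== PRECONDITION & SPEC =====
def Spec_extract_end_points (firstRow : List Int) (out : Int × Int) : Prop := out = extract_end_points_alt firstRow
instance (firstRow : List Int) (out : Int × Int) : Decidable (Spec_extract_end_points firstRow out) := by unfold Spec_extract_end_points; infer_instance

-- ===== CLAIM (what is proved, stated in full; the proofs are below) =====
def Claim_equal_extract_end_points : Prop := ∀ (firstRow : List Int), Dom_extract_end_points firstRow → Spec_extract_end_points firstRow (extract_end_points firstRow)

-- ===== LEMMAS AND PROOFS =====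

lemma pvWasteA_eq (xs : List Int) : ∀ acc, pvWasteA acc xs = acc + ((xs.takeWhile (fun x => x == 255)).length : Int) := by
  induction xs with
  | nil => intro acc; simp [pvWasteA]
  | cons x rest ih =>
      intro acc
      by_cases hx : x = 255
      · simp [pvWasteA, hx, ih]; ring
      · simp [pvWasteA, hx]

lemma pvFirstB_eq (xs : List Int) : pvFirstB xs = ((xs.takeWhile (fun x => x == 255)).length : Int) := by
  induction xs with
  | nil => simp [pvFirstB]
  | cons x rest ih =>
      by_cases hx : x = 255
      · simp only [pvFirstB, List.findIdx?_cons, hx] at ih ⊢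
        simp only [bne_self_eq_false, List.takeWhile_cons, BEq.rfl, if_true]
        cases h : rest.findIdx? (fun num => num != 255) with
        | none => simp [h] at ih ⊢; omega
        | some i => simp [h] at ih ⊢; omega
      · have : (x != 255) = true := by simp [hx]
        simp [pvFirstB, List.findIdx?_cons, this, hx]

lemma pvScanA_append (s : List Int) (x : Int) : ∀ p : Int × Int,
    pvScanA p (s ++ [x]) = ((if x = 0 then p.2 + s.length else (pvScanA p s).1), p.2 + s.length + 1) := by
  induction s with
  | nil => intro p; simp [pvScanA]
  | cons y rest ih =>
      intro p
      rw [show (y :: rest) ++ [x] = y :: (rest ++ [x]) from rfl]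
      rw [show pvScanA p (y :: (rest ++ [x]))
            = pvScanA ((if y = 0 then p.2 else p.1), p.2 + 1) (rest ++ [x]) from rfl]
      rw [ih]
      rw [show pvScanA p (y :: rest)
            = pvScanA ((if y = 0 then p.2 else p.1), p.2 + 1) rest from rfl]
      refine Prod.ext ?_ ?_
      · by_cases hx : x = 0
        · simp [hx]; ring
        · simp [hx]
      · simp; ring

lemma pvScanB_key (u : List Int) (t : List Int) : ∀ (r firstRow : List Int),
    firstRow = u ++ t ++ r →
    pvScanB firstRow (u.length : Int)
        (PySem.List.pyRange ((u.length : Int) + (t.length : Int) - 1) ((u.length : Int) - 1) (-1))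
      = ((u.length : Int), (pvScanA ((u.length : Int), (u.length : Int)) t).1) := by
  induction t using List.reverseRecOn with
  | nil =>
      intro r firstRow hfr
      rw [PySem.List.pyRange_neg_one_eq_nil (by simp)]
      simp [pvScanB, pvScanA]
  | append_singleton s x ih =>
      intro r firstRow hfr
      have hlen : ((s ++ [x]).length : Int) = (s.length : Int) + 1 := by simp
      rw [hlen]
      have hcons : PySem.List.pyRange ((u.length : Int) + ((s.length : Int) + 1) - 1) ((u.length : Int) - 1) (-1)
          = ((u.length : Int) + (s.length : Int)) ::
            PySem.List.pyRange ((u.length : Int) + (s.length : Int) - 1) ((u.length : Int) - 1) (-1) := by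
        have e1 : (u.length : Int) + ((s.length : Int) + 1) - 1 = (u.length : Int) + (s.length : Int) := by ring
        rw [e1, PySem.List.pyRange_neg_one_cons (by omega)]
      rw [hcons]
      have hget : PySem.List.pyGet? firstRow ((u.length : Int) + (s.length : Int)) = some x := by
        have h1 : firstRow = (u ++ s) ++ (x :: r) := by simp [hfr]
        have h2 : ((u.length : Int) + (s.length : Int)) = (((u ++ s).length : Nat) : Int) := by
          simp
        rw [h1, h2]
        exact PySem.List.pyGet?_append_length (u ++ s) r x
      simp only [pvScanB, hget]
      by_cases hx : x = 0
      · simp [hx, pvScanA_append]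
      · have hih := ih (x :: r) firstRow (by rw [hfr]; simp)
        simp only [hx, if_false, hih, pvScanA_append]

-- ===== VERDICT (by name: the statement is the Claim_ definition above) =====
theorem extract_end_points_spec : Claim_equal_extract_end_points := by
  intro firstRow _
  unfold Spec_extract_end_points extract_end_points extract_end_points_alt
  set u := firstRow.takeWhile (fun x => x == 255) with hu
  set t := firstRow.dropWhile (fun x => x == 255) with ht
  have hdecomp : firstRow = u ++ t ++ [] := by
    simp [hu, ht, List.takeWhile_append_dropWhile]
  have hw : pvWasteA 0 firstRow = (u.length : Int) := by
    rw [pvWasteA_eq, ← hu]; simp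
  have hwB : pvFirstB firstRow = (u.length : Int) := by
    rw [pvFirstB_eq, ← hu]
  have hslice : PySem.List.slice firstRow (some (u.length : Int)) none = t := by
    rw [PySem.List.slice_from_natCast]
    conv_lhs => rw [hdecomp]
    simp
  have hlen : ((firstRow.length : Int)) = (u.length : Int) + (t.length : Int) := by
    conv_lhs => rw [hdecomp]
    simp
  simp only [hw, hwB, hslice, hlen]
  exact (pvScanB_key u t [] firstRow hdecomp).symm
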